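-- pv_equiv track=rewrite | github.com/danielagtz3/recursion | recursion.py | group_sum_5
-- ===== SOURCE A (Python) =====
-- def group_sum_5(start, nums, target):
--     """
--     Given a list of ints, determine if there exists a group of some ints that sum to
--     the given target. Additionally, if a multiple of 5 is in the array, it must be included
--     If the value immediately following a multiple of 5 if 1, it must not be chosen
--
--     pre: start >= 0, len(nums) >= 0, target >= 0, nums will only contain ints
--     post: return True if nums has a group of ints that sum to target, False otherwise
--     """
--     if start >= len(nums):
--         return target == 0
--     if nums[start] % 5 == 0:
--         if start + 1 < len(nums) and nums[start + 1] == 1: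
--             return group_sum_5(start + 2, nums, target - nums[start])
--         return group_sum_5(start + 1, nums, target - nums[start])
--     if group_sum_5(start + 1, nums, target - nums[start]):
--         return True
--     return group_sum_5(start + 1, nums, target)
-- ===== SOURCE B (Python) =====
-- def group_sum_5(start, nums, target):
--     n = len(nums)
--     forced = 0
--     free = []
--     i = start
--     while i < n:
--         v = nums[i]
--         if v % 5 == 0:
--             forced += v
--             i += 2 if i + 1 < n and nums[i + 1] == 1 else 1
--         else:
--             free.append(v)
--             i += 1
--     sums = {0}
--     for v in free:
--         sums |= {s + v for s in sums}
--     return (target - forced) in sums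
-- ===== Notes on version B (the rewrite author's own statement) =====
-- stated objective: faster
-- what changed: replaced A's exponential include/exclude recursion by a single forced/free scan (multiples of 5 and their skipped 1-followers are summed as mandatory) followed by an iterative set of reachable subset sums of the free values
import Mathlib
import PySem

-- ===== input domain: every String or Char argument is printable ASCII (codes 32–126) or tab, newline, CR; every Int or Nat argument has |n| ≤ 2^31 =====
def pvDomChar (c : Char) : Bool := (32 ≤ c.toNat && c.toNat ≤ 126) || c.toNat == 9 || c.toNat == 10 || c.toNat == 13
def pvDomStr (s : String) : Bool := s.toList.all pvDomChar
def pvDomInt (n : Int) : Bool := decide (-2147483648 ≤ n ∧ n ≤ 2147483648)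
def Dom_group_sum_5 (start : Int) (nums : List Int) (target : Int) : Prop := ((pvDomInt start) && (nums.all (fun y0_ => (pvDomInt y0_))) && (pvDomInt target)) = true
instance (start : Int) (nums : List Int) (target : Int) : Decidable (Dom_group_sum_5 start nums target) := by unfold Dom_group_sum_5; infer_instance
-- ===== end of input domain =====

-- B replaces A's exponential include/exclude recursion by one forced/free scan plus an
-- iteratively built set of reachable subset sums (objective: faster).

-- ===== PORT A =====
-- A's recursion, made structural with a fuel bound: group_sum_5 below calls it with
-- fuel = (len(nums) - start).toNat, which suffices since start grows at every step,
-- so each branch is A's branch on every admitted input.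
def gsA (nums : List Int) : Nat → Int → Int → Bool
  | 0, _, target => decide (target = 0)
  | Nat.succ n, start, target =>
    if start ≥ (nums.length : Int) then decide (target = 0)
    else if PySem.Int.mod (PySem.List.pyGetD nums start 0) 5 = 0 then
      if start + 1 < (nums.length : Int) ∧ PySem.List.pyGetD nums (start + 1) 0 = 1 then
        gsA nums n (start + 2) (target - PySem.List.pyGetD nums start 0)
      else
        gsA nums n (start + 1) (target - PySem.List.pyGetD nums start 0)
    else
      if gsA nums n (start + 1) (target - PySem.List.pyGetD nums start 0) then true
      else gsA nums n (start + 1) target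

def group_sum_5 (start : Int) (nums : List Int) (target : Int) : Bool :=
  gsA nums ((nums.length : Int) - start).toNat start target

-- ===== PORT B =====
-- the while-loop of Source B, same fuel convention: walk from index i, summing the forced
-- multiples of 5 (skipping a following 1), collecting the freely choosable values in order
def gsCollect (nums : List Int) : Nat → Int → Int × List Int
  | 0, _ => (0, [])
  | Nat.succ n, i =>
    if i < (nums.length : Int) then
      if PySem.Int.mod (PySem.List.pyGetD nums i 0) 5 = 0 then
        if i + 1 < (nums.length : Int) ∧ PySem.List.pyGetD nums (i + 1) 0 = 1 then
          ((gsCollect nums n (i + 2)).1 + PySem.List.pyGetD nums i 0,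
           (gsCollect nums n (i + 2)).2)
        else
          ((gsCollect nums n (i + 1)).1 + PySem.List.pyGetD nums i 0,
           (gsCollect nums n (i + 1)).2)
      else
        ((gsCollect nums n (i + 1)).1, PySem.List.pyGetD nums i 0 :: (gsCollect nums n (i + 1)).2)
    else (0, [])

def group_sum_5_alt (start : Int) (nums : List Int) (target : Int) : Bool :=
  let fc := gsCollect nums ((nums.length : Int) - start).toNat start
  let sums := fc.2.foldl (fun s v => PySem.Set.union s (s.map (fun x => x + v)))
      (PySem.Set.ofList [(0 : Int)])
  PySem.Set.contains sums (target - fc.1)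

-- ===== PRECONDITION & SPEC =====
-- Pre_ excludes exactly the inputs on which Python A raises IndexError:
-- start < -len(nums) with start < len(nums) (nums[start] out of range).
def Pre_group_sum_5 (start : Int) (nums : List Int) (target : Int) : Prop :=
  -(nums.length : Int) ≤ start ∨ (nums.length : Int) ≤ start
instance (start : Int) (nums : List Int) (target : Int) : Decidable (Pre_group_sum_5 start nums target) := by unfold Pre_group_sum_5; infer_instance

def pvWitness_group_sum_5 : Int × List Int × Int := (0, [5, 1, 3], 8)

def Spec_group_sum_5 (start : Int) (nums : List Int) (target : Int) (out : Bool) : Prop := out = group_sum_5_alt start nums target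
instance (start : Int) (nums : List Int) (target : Int) (out : Bool) : Decidable (Spec_group_sum_5 start nums target out) := by unfold Spec_group_sum_5; infer_instance

-- ===== CLAIM (what is proved, stated in full; the proofs are below) =====
def Claim_equal_group_sum_5 : Prop := ∀ (start : Int) (nums : List Int) (target : Int), Dom_group_sum_5 start nums target → Pre_group_sum_5 start nums target → Spec_group_sum_5 start nums target (group_sum_5 start nums target)

-- ===== LEMMAS AND PROOFS =====

-- proof-side subset-sum predicate: some subset of vs sums to t
def ssum : List Int → Int → Bool
  | [], t => decide (t = 0)
  | v :: vs, t => ssum vs (t - v) || ssum vs t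

-- with the exact-fuel convention, A's recursion computes subset-sum over the free
-- values of the walk, relative to the forced sum
lemma gsA_eq_ssum (nums : List Int) : ∀ (n : Nat) (start target : Int),
    ((nums.length : Int) - start).toNat ≤ n →
    gsA nums n start target =
      ssum (gsCollect nums n start).2 (target - (gsCollect nums n start).1) := by
  intro n
  induction n with
  | zero =>
    intro start target hn
    have hge : (nums.length : Int) ≤ start := by omega
    simp [gsA, gsCollect, ssum]
  | succ m ih =>
    intro start target hn
    by_cases hge : (nums.length : Int) ≤ start
    · simp [gsA, gsCollect, ssum, not_lt.mpr hge, hge]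
    · have hlt : start < (nums.length : Int) := by omega
      by_cases h5 : PySem.Int.mod (PySem.List.pyGetD nums start 0) 5 = 0
      · by_cases hpk : start + 1 < (nums.length : Int) ∧ PySem.List.pyGetD nums (start + 1) 0 = 1
        · have hm2 : ((nums.length : Int) - (start + 2)).toNat ≤ m := by omega
          simp only [gsA, gsCollect, not_le.mpr hlt, if_false, if_pos hlt, if_pos h5, if_pos hpk,
            ih _ _ hm2]
          have : target - PySem.List.pyGetD nums start 0 - (gsCollect nums m (start + 2)).1
              = target - ((gsCollect nums m (start + 2)).1 + PySem.List.pyGetD nums start 0) := by ring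
          rw [this]
        · have hm : ((nums.length : Int) - (start + 1)).toNat ≤ m := by omega
          simp only [gsA, gsCollect, not_le.mpr hlt, if_false, if_pos hlt, if_pos h5, if_neg hpk,
            ih _ _ hm]
          have : target - PySem.List.pyGetD nums start 0 - (gsCollect nums m (start + 1)).1
              = target - ((gsCollect nums m (start + 1)).1 + PySem.List.pyGetD nums start 0) := by ring
          rw [this]
      · have hm : ((nums.length : Int) - (start + 1)).toNat ≤ m := by omega
        simp only [gsA, gsCollect, not_le.mpr hlt, if_false, if_pos hlt, if_neg h5,
          ih _ _ hm, ssum]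
        have h1 : target - PySem.List.pyGetD nums start 0 - (gsCollect nums m (start + 1)).1
            = target - (gsCollect nums m (start + 1)).1 - PySem.List.pyGetD nums start 0 := by ring
        rw [h1]
        cases ssum (gsCollect nums m (start + 1)).2
            (target - (gsCollect nums m (start + 1)).1 - PySem.List.pyGetD nums start 0) <;> simp

-- membership in B's iteratively built set of reachable sums is subset-sum
lemma mem_foldl_sums (x : Int) : ∀ (free : List Int) (s : PySem.Set Int),
    (x ∈ free.foldl (fun s v => PySem.Set.union s (s.map (fun x => x + v))) s) ↔
      ∃ y ∈ s, ssum free (x - y) = true := by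
  intro free
  induction free with
  | nil =>
    intro s
    simp only [List.foldl_nil, ssum, decide_eq_true_eq, sub_eq_zero]
    exact ⟨fun hx => ⟨x, hx, rfl⟩, fun ⟨y, hy, h⟩ => by rw [h]; exact hy⟩
  | cons v vs ih =>
    intro s
    simp only [List.foldl_cons, ih, ssum]
    constructor
    · rintro ⟨y, hy, hss⟩
      rcases (PySem.Set.mem_union _ _ _).1 hy with h | h
      · exact ⟨y, h, by simp [hss]⟩
      · rcases List.mem_map.1 h with ⟨z, hz, rfl⟩
        refine ⟨z, hz, ?_⟩
        have : x - (z + v) = x - z - v := by ring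
        rw [this] at hss
        simp [hss]
    · rintro ⟨y, hy, hss⟩
      rcases Bool.or_eq_true_iff.1 hss with h | h
      · refine ⟨y + v, (PySem.Set.mem_union _ _ _).2 (Or.inr (List.mem_map.2 ⟨y, hy, rfl⟩)), ?_⟩
        have : x - (y + v) = x - y - v := by ring
        rw [this]; exact h
      · exact ⟨y, (PySem.Set.mem_union _ _ _).2 (Or.inl hy), h⟩

lemma alt_eq_ssum (start : Int) (nums : List Int) (target : Int) :
    group_sum_5_alt start nums target =
      ssum (gsCollect nums ((nums.length : Int) - start).toNat start).2
        (target - (gsCollect nums ((nums.length : Int) - start).toNat start).1) := by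
  unfold group_sum_5_alt
  rw [Bool.eq_iff_iff, PySem.Set.contains_iff, mem_foldl_sums]
  constructor
  · rintro ⟨y, hy, hss⟩
    have : y = 0 := by simpa [PySem.Set.ofList] using hy
    subst this
    simpa using hss
  · intro h
    exact ⟨0, by simp [PySem.Set.ofList], by simpa using h⟩

-- ===== VERDICT (by name: the statement is the Claim_ definition above) =====
theorem group_sum_5_spec : Claim_equal_group_sum_5 := by
  intro start nums target _ _
  unfold Spec_group_sum_5
  rw [alt_eq_ssum]
  exact gsA_eq_ssum nums _ start target (le_refl _)
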